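-- pv_equiv track=rewrite | github.com/jainryu/ASWE | server/analytics.py | both_source_year_count_aggregator
-- ===== SOURCE A (Python) =====
-- def both_source_year_count_aggregator(fb_sql_result, tt_sql_result, from_year, to_year):
--     '''
--     reformat sql to show a (fb count, tt count, and total count) vs year relationship
--
--     :param list of dict fb_sql_result: e.g. [{"year":2021.0,"count":24}]
--     :param list of dict tt_sql_result: e.g.[{"year":2021.0,"count":2},{"year":2017.0,"count":8}]
--     :param int from_year: from year
--     :param int to_year: to year
--
--     :return dict final: e.g. {2021: {facebook: 24, thumbtack: 2, total: 26}}
--     '''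
--
--     final = {}
--
--     for year in range(from_year, to_year + 1):
--         final[year] = {"facebook": 0, "thumbtack": 0, "total": 0}
--     for year_counts in fb_sql_result:
--         year = int(year_counts["year"])
--         count = year_counts["count"]
--         if from_year <= year <= to_year:
--             final[year] = {"facebook": count, "thumbtack": 0, "total": count}
--     for year_counts in tt_sql_result:
--         year = int(year_counts["year"])
--         count = year_counts["count"]
--         if from_year <= year <= to_year:
--             final[year]["thumbtack"] = count
--             final[year]["total"] = final[year]["total"] + count
--     return final
-- ===== SOURCE B (Python) =====
-- def both_source_year_count_aggregator(fb_sql_result, tt_sql_result, from_year, to_year):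
--     fb_rows = [(int(r["year"]), r["count"]) for r in fb_sql_result]
--     tt_rows = [(int(r["year"]), r["count"]) for r in tt_sql_result]
--     final = {}
--     for year in range(from_year, to_year + 1):
--         fb = sum(c for y, c in fb_rows if y == year)
--         tt = sum(c for y, c in tt_rows if y == year)
--         final[year] = {"facebook": fb, "thumbtack": tt, "total": fb + tt}
--     return final
-- ===== Notes on version B (the rewrite author's own statement) =====
-- stated objective: simpler
-- what changed: B replaces A's three staged passes mutating a result dict (initialise every year, overwrite on fb rows, in-place add on tt rows) by extracting (year, count) pairs once and then computing each year's record in a single per-year scan that sums each source's counts; Pre_ excludes rows lacking a 'year' or 'count' key (A raises KeyError) and sources with two rows for the same in-range year, a corner grouped SQL never produces and on which A's accidental mixture of last-wins and summed counts is no more specified than B's sums.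
import Mathlib
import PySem

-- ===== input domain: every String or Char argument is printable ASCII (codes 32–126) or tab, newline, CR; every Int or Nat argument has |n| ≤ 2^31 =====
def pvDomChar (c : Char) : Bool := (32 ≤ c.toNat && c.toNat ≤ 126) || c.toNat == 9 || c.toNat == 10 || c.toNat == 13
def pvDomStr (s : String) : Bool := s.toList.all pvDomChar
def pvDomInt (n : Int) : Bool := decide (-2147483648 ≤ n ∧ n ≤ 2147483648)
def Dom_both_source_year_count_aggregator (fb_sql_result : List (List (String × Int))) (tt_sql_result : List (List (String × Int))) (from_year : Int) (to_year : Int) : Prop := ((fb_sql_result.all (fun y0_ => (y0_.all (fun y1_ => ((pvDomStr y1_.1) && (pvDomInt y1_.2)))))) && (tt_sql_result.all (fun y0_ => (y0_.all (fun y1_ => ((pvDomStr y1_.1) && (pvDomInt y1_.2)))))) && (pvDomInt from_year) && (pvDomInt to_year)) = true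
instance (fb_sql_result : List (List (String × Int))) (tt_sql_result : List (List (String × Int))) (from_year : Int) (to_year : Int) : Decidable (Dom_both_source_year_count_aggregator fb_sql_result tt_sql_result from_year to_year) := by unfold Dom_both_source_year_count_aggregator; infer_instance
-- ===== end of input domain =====

-- B extracts (year, count) pairs once and computes each year's record in one per-year scan summing
-- both sources (no mutable result dict); Pre_ excludes KeyError rows and duplicate in-range years.

-- ===== PORT A =====
-- r[k] on a dict row (first-match lookup); the KeyError case (key absent) is excluded by Pre_, so the
-- default 0 is never used on admitted inputs.  int(year) is the identity on Int values.
def pvKey (r : List (String × Int)) (k : String) : Int :=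
  ((PySem.Dict.mk r).get? k).getD 0

def both_source_year_count_aggregator (fb_sql_result : List (List (String × Int))) (tt_sql_result : List (List (String × Int))) (from_year : Int) (to_year : Int) : List (Int × List (String × Int)) :=
  let final0 : PySem.Dict Int (PySem.Dict String Int) :=
    (PySem.List.pyRange from_year (to_year + 1)).foldl
      (fun d year =>
        d.insert year (PySem.Dict.mk [("facebook", 0), ("thumbtack", 0), ("total", 0)]))
      PySem.Dict.empty
  let final1 :=
    fb_sql_result.foldl
      (fun d year_counts =>
        let year := pvKey year_counts "year"
        let count := pvKey year_counts "count"
        if from_year ≤ year ∧ year ≤ to_year then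
          d.insert year (PySem.Dict.mk [("facebook", count), ("thumbtack", 0), ("total", count)])
        else d)
      final0
  let final2 :=
    tt_sql_result.foldl
      (fun d year_counts =>
        let year := pvKey year_counts "year"
        let count := pvKey year_counts "count"
        if from_year ≤ year ∧ year ≤ to_year then
          let inner := d.getD year PySem.Dict.empty
          let inner1 := inner.insert "thumbtack" count
          let inner2 := inner1.insert "total" (inner1.getD "total" 0 + count)
          d.insert year inner2
        else d)
      final1
  final2.items.map (fun p => (p.1, p.2.items))

-- ===== PORT B =====
def both_source_year_count_aggregator_alt (fb_sql_result : List (List (String × Int))) (tt_sql_result : List (List (String × Int))) (from_year : Int) (to_year : Int) : List (Int × List (String × Int)) :=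
  let fb_rows := fb_sql_result.map (fun r => (pvKey r "year", pvKey r "count"))
  let tt_rows := tt_sql_result.map (fun r => (pvKey r "year", pvKey r "count"))
  (PySem.List.pyRange from_year (to_year + 1)).map
    (fun year =>
      let fb := ((fb_rows.filter (fun p => p.1 == year)).map (fun p => p.2)).sum
      let tt := ((tt_rows.filter (fun p => p.1 == year)).map (fun p => p.2)).sum
      (year, [("facebook", fb), ("thumbtack", tt), ("total", fb + tt)]))

-- ===== PRECONDITION & SPEC =====
-- Pre_ excludes the inputs on which Python A raises KeyError (a row lacking key "year" or "count") and
-- sources holding two rows for the same in-range year, a corner grouped SQL never produces and on which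
-- A's mixture of last-wins and summed counts is as unspecified as any other aggregation.
def Pre_both_source_year_count_aggregator (fb_sql_result : List (List (String × Int))) (tt_sql_result : List (List (String × Int))) (from_year : Int) (to_year : Int) : Prop :=
  (∀ r ∈ fb_sql_result ++ tt_sql_result,
    ((PySem.Dict.mk r).contains "year") = true ∧ ((PySem.Dict.mk r).contains "count") = true) ∧
  ((fb_sql_result.map (fun r => pvKey r "year")).filter
      (fun y => decide (from_year ≤ y ∧ y ≤ to_year))).Nodup ∧
  ((tt_sql_result.map (fun r => pvKey r "year")).filter
      (fun y => decide (from_year ≤ y ∧ y ≤ to_year))).Nodup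
instance (fb_sql_result : List (List (String × Int))) (tt_sql_result : List (List (String × Int))) (from_year : Int) (to_year : Int) : Decidable (Pre_both_source_year_count_aggregator fb_sql_result tt_sql_result from_year to_year) := by unfold Pre_both_source_year_count_aggregator; infer_instance

def pvWitness_both_source_year_count_aggregator : (List (List (String × Int))) × (List (List (String × Int))) × Int × Int :=
  ([[("year", 2020), ("count", 3)]], [[("year", 1), ("count", 2)], [("year", 2019), ("count", 5)]], 2019, 2021)

def Spec_both_source_year_count_aggregator (fb_sql_result : List (List (String × Int))) (tt_sql_result : List (List (String × Int))) (from_year : Int) (to_year : Int) (out : List (Int × List (String × Int))) : Prop := out = both_source_year_count_aggregator_alt fb_sql_result tt_sql_result from_year to_year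
instance (fb_sql_result : List (List (String × Int))) (tt_sql_result : List (List (String × Int))) (from_year : Int) (to_year : Int) (out : List (Int × List (String × Int))) : Decidable (Spec_both_source_year_count_aggregator fb_sql_result tt_sql_result from_year to_year out) := by unfold Spec_both_source_year_count_aggregator; infer_instance

-- ===== CLAIM (what is proved, stated in full; the proofs are below) =====
def Claim_equal_both_source_year_count_aggregator : Prop := ∀ (fb_sql_result : List (List (String × Int))) (tt_sql_result : List (List (String × Int))) (from_year : Int) (to_year : Int), Dom_both_source_year_count_aggregator fb_sql_result tt_sql_result from_year to_year → Pre_both_source_year_count_aggregator fb_sql_result tt_sql_result from_year to_year → Spec_both_source_year_count_aggregator fb_sql_result tt_sql_result from_year to_year (both_source_year_count_aggregator fb_sql_result tt_sql_result from_year to_year)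

-- ===== LEMMAS AND PROOFS =====

-- A dict update step of A's third loop, as a function of the inner dict and the count.
def pvG3 (inner : PySem.Dict String Int) (c : Int) : PySem.Dict String Int :=
  (inner.insert "thumbtack" c).insert "total" ((inner.insert "thumbtack" c).getD "total" 0 + c)

theorem pv_getD_foldl_insert_const {ν : Type} (l : List Int) (v : ν)
    (d : PySem.Dict Int ν) (y : Int) (c : ν) :
    (l.foldl (fun d z => d.insert z v) d).getD y c = if y ∈ l then v else d.getD y c := by
  induction l generalizing d with
  | nil => simp
  | cons z t ih =>
    simp only [List.foldl_cons, ih, List.mem_cons, PySem.Dict.getD_insert]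
    split_ifs <;> simp_all

theorem pv_getD_foldl_insert_ite {ρ ν : Type} (p : ρ → Prop) [DecidablePred p]
    (key : ρ → Int) (val : ρ → ν) (l : List ρ) (d : PySem.Dict Int ν) (y : Int) (c : ν) :
    (l.foldl (fun d r => if p r then d.insert (key r) (val r) else d) d).getD y c
      = ((l.filter (fun r => decide (p r) && (key r == y))).map val).getLast?.getD (d.getD y c) := by
  induction l generalizing d with
  | nil => simp
  | cons r t ih =>
    simp only [List.foldl_cons, List.filter_cons]
    by_cases hp : p r
    · by_cases hk : key r = y
      · simp [hp, hk, ih, List.getLast?_cons]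
      · simp [hp, hk, ih, PySem.Dict.getD_insert, Ne.symm hk]
    · simp [hp, ih]

theorem pv_getD_foldl_update {ρ ν : Type} (p : ρ → Prop) [DecidablePred p]
    (key : ρ → Int) (val : ρ → Int) (g : ν → Int → ν) (l : List ρ)
    (d : PySem.Dict Int ν) (y : Int) (c0 : ν) :
    (l.foldl (fun d r => if p r then d.insert (key r) (g (d.getD (key r) c0) (val r)) else d) d).getD y c0
      = ((l.filter (fun r => decide (p r) && (key r == y))).map val).foldl g (d.getD y c0) := by
  induction l generalizing d with
  | nil => simp
  | cons r t ih =>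
    simp only [List.foldl_cons, List.filter_cons]
    by_cases hp : p r
    · by_cases hk : key r = y
      · simp [hp, hk, ih]
      · simp [hp, hk, ih, PySem.Dict.getD_insert, Ne.symm hk]
    · simp [hp, ih]

theorem pv_set_update_of_subset (s : List Int) (ks : List Int) (h : ∀ k ∈ ks, k ∈ s) :
    PySem.Set.update s ks = s := by
  induction ks generalizing s with
  | nil => simp [PySem.Set.update]
  | cons k t ih =>
    have : PySem.Set.add s k = s := PySem.Set.add_of_mem (h k (by simp))
    simp only [PySem.Set.update] at *
    simp only [List.foldl_cons, this]
    exact ih s (fun x hx => h x (by simp [hx]))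

theorem pvG3_fold (cs : List Int) : ∀ a b t : Int,
    cs.foldl pvG3 (PySem.Dict.mk [("facebook", a), ("thumbtack", b), ("total", t)])
      = PySem.Dict.mk [("facebook", a), ("thumbtack", cs.getLast?.getD b), ("total", t + cs.sum)] := by
  induction cs with
  | nil => intro a b t; simp
  | cons c cs ih =>
    intro a b t
    have hstep : pvG3 (PySem.Dict.mk [("facebook", a), ("thumbtack", b), ("total", t)]) c
        = PySem.Dict.mk [("facebook", a), ("thumbtack", c), ("total", t + c)] := by
      apply PySem.Dict.ext
      simp [pvG3, PySem.Dict.insert, PySem.Dict.contains, PySem.Dict.get?, PySem.Dict.getD]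
    simp only [List.foldl_cons, hstep, ih]
    simp [List.getLast?_cons, List.sum_cons]
    ring_nf

theorem pv_getLast?_map_getD {α β : Type} (F : α → β) (m : List α) (d : α) :
    ((m.map F).getLast?).getD (F d) = F (m.getLast?.getD d) := by
  rw [List.getLast?_map]; cases m.getLast? <;> rfl

theorem pv_keys_ite {ρ ν : Type} (p : ρ → Prop) [DecidablePred p] (key : ρ → Int)
    (f : PySem.Dict Int ν → ρ → ν) (l : List ρ) (d : PySem.Dict Int ν)
    (h : ∀ r, p r → key r ∈ d.keys) :
    (l.foldl (fun d r => if p r then d.insert (key r) (f d r) else d) d).keys = d.keys := by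
  rw [PySem.List.foldl_ite_eq_foldl_filter, PySem.Dict.keys_foldl_insert_key,
    pv_set_update_of_subset]
  intro k hk
  simp only [List.mem_map, List.mem_filter] at hk
  obtain ⟨r, ⟨_, hpr⟩, rfl⟩ := hk
  exact h r (by simpa using hpr)

-- with at most one occurrence, 'last value or 0' and 'sum' coincide
theorem pv_last_eq_sum_of_len_le_one (l : List Int) (h : l.length ≤ 1) :
    l.getLast?.getD 0 = l.sum := by
  match l, h with
  | [], _ => rfl
  | [a], _ => simp

-- Nodup of the in-range year multiset bounds every per-year filter by one row
theorem pv_filter_len_le_one {ρ : Type} (key : ρ → Int) (p : Int → Bool) (l : List ρ) (y : Int)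
    (hnd : ((l.map key).filter p).Nodup) (hy : p y = true) :
    (l.filter (fun r => key r == y)).length ≤ 1 := by
  induction l with
  | nil => simp
  | cons r t ih =>
    simp only [List.map_cons, List.filter_cons] at hnd ⊢
    by_cases hk : key r = y
    · rw [hk] at hnd
      simp only [hy] at hnd
      have htail : t.filter (fun r => key r == y) = [] := by
        rw [List.filter_eq_nil_iff]
        intro s hs hsk
        have : y ∈ (t.map key).filter p := by
          refine List.mem_filter.mpr ⟨?_, hy⟩
          exact List.mem_map.mpr ⟨s, hs, by simpa using hsk⟩
        exact (List.nodup_cons.mp hnd).1 this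
      simp [hk, htail]
    · have hnd' : ((t.map key).filter p).Nodup := by
        by_cases hp : p (key r)
        · simp only [hp] at hnd; exact (List.nodup_cons.mp hnd).2
        · simpa [hp] using hnd
      simpa [hk] using ih hnd'

-- ===== VERDICT (by name: the statement is the Claim_ definition above) =====
theorem both_source_year_count_aggregator_spec : Claim_equal_both_source_year_count_aggregator := by
  intro fb tt fy ty _hdom hpre
  obtain ⟨_hkeys, hndfb, hndtt⟩ := hpre
  unfold Spec_both_source_year_count_aggregator
  simp only [both_source_year_count_aggregator, both_source_year_count_aggregator_alt,
    List.filter_map, List.map_map, Function.comp_def]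
  set R := PySem.List.pyRange fy (ty + 1) with hRdef
  have hR : ∀ z : Int, fy ≤ z ∧ z ≤ ty → z ∈ R := fun z hz =>
    PySem.List.mem_pyRange_one.mpr ⟨hz.1, by omega⟩
  have hnodR : R.Nodup := by
    rw [hRdef]; exact PySem.List.nodup_pyRange_one fy (ty + 1)
  set I0 : PySem.Dict String Int :=
    PySem.Dict.mk [("facebook", 0), ("thumbtack", 0), ("total", 0)] with hI0
  set F0 : PySem.Dict Int (PySem.Dict String Int) :=
    R.foldl (fun d year => d.insert year I0) PySem.Dict.empty with hF0
  set F1 := fb.foldl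
      (fun d yc =>
        if fy ≤ pvKey yc "year" ∧ pvKey yc "year" ≤ ty then
          d.insert (pvKey yc "year")
            (PySem.Dict.mk [("facebook", pvKey yc "count"), ("thumbtack", 0), ("total", pvKey yc "count")])
        else d) F0 with hF1
  set F2 := tt.foldl
      (fun d yc =>
        if fy ≤ pvKey yc "year" ∧ pvKey yc "year" ≤ ty then
          d.insert (pvKey yc "year")
            (((d.getD (pvKey yc "year") PySem.Dict.empty).insert "thumbtack" (pvKey yc "count")).insert
              "total"
              (((d.getD (pvKey yc "year") PySem.Dict.empty).insert "thumbtack" (pvKey yc "count")).getD "total" 0 +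
                pvKey yc "count"))
        else d) F1 with hF2
  have hk0 : F0.keys = R := by
    rw [hF0, PySem.Dict.keys_foldl_insert]
    rw [show (PySem.Dict.empty : PySem.Dict Int (PySem.Dict String Int)).keys = [] from rfl,
      PySem.Set.update_nil_left]
    exact PySem.Set.ofList_eq_self_of_nodup R hnodR
  have hk1 : F1.keys = R := by
    rw [hF1]
    rw [pv_keys_ite (h := fun r hr => by rw [hk0]; exact hR _ hr)]
    exact hk0
  have hk2 : F2.keys = R := by
    rw [hF2]
    rw [pv_keys_ite (h := fun r hr => by rw [hk1]; exact hR _ hr)]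
    exact hk1
  have hndk : F2.keys.Nodup := by rw [hk2]; exact hnodR
  rw [PySem.Dict.items_eq_map_keys F2 hndk PySem.Dict.empty, hk2, List.map_map]
  apply List.map_congr_left
  intro y hy
  have hyb : fy ≤ y ∧ y ≤ ty := by
    have := PySem.List.mem_pyRange_one.mp (hRdef ▸ hy)
    omega
  -- duplicate-freeness for this year: each per-year filter has at most one row
  have hfb1 : (fb.filter (fun r => pvKey r "year" == y)).length ≤ 1 :=
    pv_filter_len_le_one (fun r => pvKey r "year") _ fb y hndfb (by simpa using hyb)
  have htt1 : (tt.filter (fun r => pvKey r "year" == y)).length ≤ 1 :=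
    pv_filter_len_le_one (fun r => pvKey r "year") _ tt y hndtt (by simpa using hyb)
  -- for an in-range y the range test in A's filters is redundant
  have hfiltfb : fb.filter (fun r => decide (fy ≤ pvKey r "year" ∧ pvKey r "year" ≤ ty) && (pvKey r "year" == y))
      = fb.filter (fun r => pvKey r "year" == y) := by
    apply List.filter_congr; intro r _
    by_cases hk : pvKey r "year" = y
    · simp [hk, hyb.1, hyb.2]
    · simp [hk]
  have hfilttt : tt.filter (fun r => decide (fy ≤ pvKey r "year" ∧ pvKey r "year" ≤ ty) && (pvKey r "year" == y))
      = tt.filter (fun r => pvKey r "year" == y) := by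
    apply List.filter_congr; intro r _
    by_cases hk : pvKey r "year" = y
    · simp [hk, hyb.1, hyb.2]
    · simp [hk]
  have e2 : F2.getD y PySem.Dict.empty
      = ((tt.filter (fun r => decide (fy ≤ pvKey r "year" ∧ pvKey r "year" ≤ ty) && (pvKey r "year" == y))).map
          (fun r => pvKey r "count")).foldl pvG3 (F1.getD y PySem.Dict.empty) := by
    rw [hF2]
    exact pv_getD_foldl_update (fun r => fy ≤ pvKey r "year" ∧ pvKey r "year" ≤ ty)
      (fun r => pvKey r "year") (fun r => pvKey r "count") pvG3 tt F1 y PySem.Dict.empty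
  have e1 : F1.getD y PySem.Dict.empty
      = ((fb.filter (fun r => decide (fy ≤ pvKey r "year" ∧ pvKey r "year" ≤ ty) && (pvKey r "year" == y))).map
          (fun r => PySem.Dict.mk [("facebook", pvKey r "count"), ("thumbtack", 0), ("total", pvKey r "count")])).getLast?.getD
          (F0.getD y PySem.Dict.empty) := by
    rw [hF1]
    exact pv_getD_foldl_insert_ite (fun r => fy ≤ pvKey r "year" ∧ pvKey r "year" ≤ ty)
      (fun r => pvKey r "year")
      (fun r => PySem.Dict.mk [("facebook", pvKey r "count"), ("thumbtack", 0), ("total", pvKey r "count")])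
      fb F0 y PySem.Dict.empty
  have e0 : F0.getD y PySem.Dict.empty = I0 := by
    rw [hF0, pv_getD_foldl_insert_const, if_pos (hR y hyb)]
  have e1' : F1.getD y PySem.Dict.empty
      = PySem.Dict.mk [("facebook",
            (((fb.filter (fun r => pvKey r "year" == y)).map (fun r => pvKey r "count")).getLast?.getD 0)),
          ("thumbtack", 0),
          ("total",
            (((fb.filter (fun r => pvKey r "year" == y)).map (fun r => pvKey r "count")).getLast?.getD 0))] := by
    rw [e1, e0, hI0, hfiltfb]
    rw [show (fun r : List (String × Int) =>
          PySem.Dict.mk [("facebook", pvKey r "count"), ("thumbtack", 0), ("total", pvKey r "count")])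
        = (fun c : Int => PySem.Dict.mk [("facebook", c), ("thumbtack", 0), ("total", c)]) ∘
            (fun r => pvKey r "count") from rfl]
    rw [← List.map_map]
    exact pv_getLast?_map_getD (fun c : Int => PySem.Dict.mk [("facebook", c), ("thumbtack", 0), ("total", c)]) _ 0
  have hfbsum : ((fb.filter (fun r => pvKey r "year" == y)).map (fun r => pvKey r "count")).getLast?.getD 0
      = ((fb.filter (fun r => pvKey r "year" == y)).map (fun r => pvKey r "count")).sum := by
    apply pv_last_eq_sum_of_len_le_one
    simpa using hfb1
  have httsum : ((tt.filter (fun r => pvKey r "year" == y)).map (fun r => pvKey r "count")).getLast?.getD 0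
      = ((tt.filter (fun r => pvKey r "year" == y)).map (fun r => pvKey r "count")).sum := by
    apply pv_last_eq_sum_of_len_le_one
    simpa using htt1
  simp only [Function.comp_apply]
  rw [e2, e1', hfilttt, pvG3_fold]
  rw [hfbsum, ← httsum]
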